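-- pv_equiv track=rewrite | github.com/daniel-reich/ubiquitous-fiesta | zzibM5MaxDNvQCrEk_22.py | will_fit
-- ===== SOURCE A (Python) =====
-- def will_fit(holds, cargo):
--   counter = 0
--   mydct = {'S':50,'M':100,'L':200}
--   for i in set(holds):
--     counter+= holds.count(i) * mydct[i]
--   if counter >= sum(cargo):
--     return True
--   return False
-- ===== SOURCE B (Python) =====
-- def will_fit(holds, cargo):
--     weights = {'S': 50, 'M': 100, 'L': 200}
--
--     def go(hs, need):
--         if need <= 0:
--             return True
--         if not hs:
--             return False
--         return go(hs[1:], need - weights[hs[0]])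
--
--     return go(holds, sum(cargo))
-- ===== Notes on version B (the rewrite author's own statement) =====
-- stated objective: alternative
-- what changed: Replaces A's two-phase 'tally distinct letters with holds.count, then compare total capacity to sum(cargo)' with a recursive deficit consumer: start from need=sum(cargo), peel one hold at a time subtracting its weight, and short-circuit True the moment the need is exhausted; no total-capacity accumulator or final comparison of two sums.
import Mathlib
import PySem

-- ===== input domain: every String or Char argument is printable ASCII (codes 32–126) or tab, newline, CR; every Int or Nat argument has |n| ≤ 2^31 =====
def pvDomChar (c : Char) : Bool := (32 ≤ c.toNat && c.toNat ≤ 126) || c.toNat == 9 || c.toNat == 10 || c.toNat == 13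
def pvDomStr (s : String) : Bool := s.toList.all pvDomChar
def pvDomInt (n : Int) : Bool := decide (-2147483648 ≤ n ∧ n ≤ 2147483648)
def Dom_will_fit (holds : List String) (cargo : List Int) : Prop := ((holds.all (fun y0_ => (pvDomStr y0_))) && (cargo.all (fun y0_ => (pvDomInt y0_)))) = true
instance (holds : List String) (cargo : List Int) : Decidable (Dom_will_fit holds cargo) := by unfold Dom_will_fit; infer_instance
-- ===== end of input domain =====

-- B replaces A's tally-and-compare with a recursive deficit consumer that
-- short-circuits as soon as the cargo need is exhausted (alternative decomposition).

-- ===== PORT A =====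
-- the weight dict {'S':50,'M':100,'L':200}; mydct[i] raises KeyError outside its keys,
-- which Pre_will_fit excludes, so the total `getD 0` is only reached under Pre_.
def pvDct : PySem.Dict String Int := PySem.Dict.ofList [("S", 50), ("M", 100), ("L", 200)]

def will_fit (holds : List String) (cargo : List Int) : Bool :=
  let counter : Int :=
    (PySem.Set.ofList holds).foldl
      (fun acc i => acc + (PySem.List.count holds i : Int) * (PySem.Dict.get? pvDct i).getD 0) 0
  if counter ≥ cargo.sum then true else false

-- ===== PORT B =====
-- B's weight dict (same literal, written in Source B itself)
def pvWeights : PySem.Dict String Int := PySem.Dict.ofList [("S", 50), ("M", 100), ("L", 200)]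

-- Source B's inner `go`: consume holds one at a time, subtracting each weight from the
-- remaining need, returning true as soon as need ≤ 0.  weights[h] raises KeyError on
-- bad keys (excluded by Pre_); `getD 0` only totalizes the lookup.
def pvGo : List String → Int → Bool
  | hs, need =>
    if need ≤ 0 then true
    else match hs with
      | [] => false
      | h :: t => pvGo t (need - (PySem.Dict.get? pvWeights h).getD 0)

def will_fit_alt (holds : List String) (cargo : List Int) : Bool :=
  pvGo holds cargo.sum

-- ===== PRECONDITION & SPEC =====
-- A (and B) raise KeyError on any hold letter outside {'S','M','L'}; Pre_ excludes exactly those.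
def Pre_will_fit (holds : List String) (cargo : List Int) : Prop :=
  ∀ s ∈ holds, s = "S" ∨ s = "M" ∨ s = "L"
instance (holds : List String) (cargo : List Int) : Decidable (Pre_will_fit holds cargo) := by
  unfold Pre_will_fit; infer_instance

def pvWitness_will_fit : List String × List Int := (["S", "M", "L", "S"], [100, 200, 50])

def Spec_will_fit (holds : List String) (cargo : List Int) (out : Bool) : Prop :=
  out = will_fit_alt holds cargo
instance (holds : List String) (cargo : List Int) (out : Bool) : Decidable (Spec_will_fit holds cargo out) := by
  unfold Spec_will_fit; infer_instance

-- ===== CLAIM =====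
def Claim_equal_will_fit : Prop := ∀ (holds : List String) (cargo : List Int), Dom_will_fit holds cargo → Pre_will_fit holds cargo → Spec_will_fit holds cargo (will_fit holds cargo)

-- ===== LEMMAS AND PROOFS =====

-- summing count(i)·w(i) over the distinct elements equals summing w over the list itself
theorem pv_sum_count_mul (l : List String) (w : String → Int) :
    ((PySem.Set.ofList l).map (fun i => (l.count i : Int) * w i)).sum = (l.map w).sum := by
  have hdd : PySem.Set.ofList l = PySem.List.dedup l := (PySem.List.dedup_eq_ofList l).symm
  rw [hdd]
  have nd : (PySem.List.dedup l).Nodup := PySem.List.nodup_dedup l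
  have h1 : (PySem.List.dedup l).toFinset.sum (fun i => (l.count i : Int) * w i)
      = ((PySem.List.dedup l).map (fun i => (l.count i : Int) * w i)).sum :=
    List.sum_toFinset _ nd
  have h2 : (PySem.List.dedup l).toFinset = l.toFinset := by
    apply Finset.ext; intro a; simp [PySem.List.dedup_eq_ofList]
  have h3 : (l.map w).sum = ∑ m ∈ l.toFinset, l.count m • w m :=
    Finset.sum_list_map_count l w
  rw [← h1, h2, h3]
  apply Finset.sum_congr rfl
  intro x _
  ring

-- A's value is 'total weight ≥ sum cargo'
theorem pv_A_eq (holds : List String) (cargo : List Int) :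
    will_fit holds cargo
      = decide ((holds.map (fun c => (PySem.Dict.get? pvDct c).getD 0)).sum ≥ cargo.sum) := by
  unfold will_fit
  rw [PySem.List.foldl_add (g := fun i => (PySem.List.count holds i : Int) * (PySem.Dict.get? pvDct i).getD 0)]
  simp only [PySem.List.count_eq, zero_add]
  rw [pv_sum_count_mul holds (fun c => (PySem.Dict.get? pvDct c).getD 0)]
  by_cases h : (holds.map (fun c => (PySem.Dict.get? pvDct c).getD 0)).sum ≥ cargo.sum <;> simp [h]

-- each valid letter's weight is nonnegative
theorem pv_w_nonneg (s : String) (h : s = "S" ∨ s = "M" ∨ s = "L") :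
    0 ≤ (PySem.Dict.get? pvWeights s).getD 0 := by
  rcases h with h | h | h <;> subst h <;> decide

-- B's recursion computes 'total weight ≥ need' when all letters are valid
theorem pv_go_eq (hs : List String) (need : Int)
    (hpre : ∀ s ∈ hs, s = "S" ∨ s = "M" ∨ s = "L") :
    pvGo hs need
      = decide ((hs.map (fun c => (PySem.Dict.get? pvWeights c).getD 0)).sum ≥ need) := by
  induction hs generalizing need with
  | nil => unfold pvGo; by_cases h : need ≤ 0 <;> simp [h] <;> omega
  | cons h t ih =>
    have hw : 0 ≤ (PySem.Dict.get? pvWeights h).getD 0 :=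
      pv_w_nonneg h (hpre h (List.mem_cons_self))
    have hsum : 0 ≤ (t.map (fun c => (PySem.Dict.get? pvWeights c).getD 0)).sum := by
      apply List.sum_nonneg
      intro x hx
      rcases List.mem_map.1 hx with ⟨s, hs, rfl⟩
      exact pv_w_nonneg s (hpre s (List.mem_cons_of_mem _ hs))
    unfold pvGo
    by_cases hn : need ≤ 0
    · simp [hn]; omega
    · rw [if_neg hn]
      have hm : (match h :: t with
          | [] => false
          | h' :: t' => pvGo t' (need - (PySem.Dict.get? pvWeights h').getD 0))
          = pvGo t (need - (PySem.Dict.get? pvWeights h).getD 0) := rfl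
      rw [hm, ih _ (fun s hs => hpre s (List.mem_cons_of_mem _ hs))]
      simp only [List.map_cons, List.sum_cons]
      by_cases hc : (t.map (fun c => (PySem.Dict.get? pvWeights c).getD 0)).sum ≥
          need - (PySem.Dict.get? pvWeights h).getD 0 <;>
        [skip; skip] <;> simp [hc] <;> omega

-- ===== VERDICT =====
theorem will_fit_spec : Claim_equal_will_fit := by
  intro holds cargo _ hpre
  unfold Spec_will_fit will_fit_alt
  rw [pv_A_eq, pv_go_eq holds cargo.sum hpre]
  rfl
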